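-- pv_equiv track=rewrite | github.com/andrewthederp/Andreaws_utility_lib | utilities/misc.py | _do_row_magic
-- ===== SOURCE A (Python) =====
-- def _do_row_magic(row_data):
--     max_height = max(i.count("\n") for i in row_data) + 1
--     row_data = [row.split('\n') for row in row_data]
--
--     for i, x in enumerate(row_data):
--         if len(x) < max_height:
--             temp = [""] * max_height
--             start_index = (max_height - len(x)) // 2
--             for j in range(start_index, start_index + len(x)):
--                 temp[j] = x[j - start_index]
--             row_data[i] = temp
--
--     return row_data
-- ===== SOURCE B (Python) =====
-- def _do_row_magic(row_data):
--     max_height = max(row.count("\n") for row in row_data) + 1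
--     result = []
--     for row in row_data:
--         block = row.split("\n")
--         grow_bottom = True
--         while len(block) < max_height:
--             if grow_bottom:
--                 block = block + [""]
--             else:
--                 block = [""] + block
--             grow_bottom = not grow_bottom
--         result.append(block)
--     return result
-- ===== Notes on version B (the rewrite author's own statement) =====
-- stated objective: alternative
-- what changed: Replaces A's computed center offset ((max_height-len)//2) and in-place index-fill of a preallocated blank list with an incremental growth loop that alternately appends a blank line to the bottom and to the top of each block until it reaches max_height, so no offset arithmetic or preallocation occurs.
import Mathlib
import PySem

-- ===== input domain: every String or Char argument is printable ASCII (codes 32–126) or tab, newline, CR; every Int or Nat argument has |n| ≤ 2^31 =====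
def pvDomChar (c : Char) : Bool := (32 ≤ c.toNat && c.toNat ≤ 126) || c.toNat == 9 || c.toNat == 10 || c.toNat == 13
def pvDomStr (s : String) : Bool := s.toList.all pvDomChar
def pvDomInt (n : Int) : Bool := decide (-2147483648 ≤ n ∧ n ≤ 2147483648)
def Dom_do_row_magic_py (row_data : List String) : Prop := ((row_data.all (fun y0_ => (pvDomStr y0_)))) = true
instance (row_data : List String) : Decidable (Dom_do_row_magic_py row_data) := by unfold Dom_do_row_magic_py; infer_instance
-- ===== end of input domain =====

-- B drops A's center-offset arithmetic and preallocated index-filled list: each block is grown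
-- by alternately appending a blank line to its bottom and its top until it reaches max_height
-- (objective: alternative). Equivalence is about the return value; A only rebinds its local,
-- so there is no caller-visible mutation.

-- ===== PORT A =====
def do_row_magic_py (row_data : List String) : List (List String) :=
  let max_height : Int :=
    (PySem.List.max? (row_data.map (fun i => (PySem.Str.count i "\n" : Int))) (fun v => v)).getD 0 + 1
  let rows := row_data.map (fun row => (PySem.Str.split? row "\n").getD [])
  (PySem.List.enumerate rows 0).foldl
    (fun acc p =>
      if PySem.List.len p.2 < max_height then
        let temp := PySem.List.pyRepeat [""] max_height
        let start_index := PySem.Int.floordiv (max_height - PySem.List.len p.2) 2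
        let temp := (PySem.List.pyRange start_index (start_index + PySem.List.len p.2) 1).foldl
          (fun t j => PySem.List.pySetD t j (PySem.List.pyGetD p.2 (j - start_index) "")) temp
        acc.set p.1.toNat temp
      else acc)
    rows

-- ===== PORT B =====
-- the while loop of Source B: alternately append a blank line to bottom / top until height reached
def padBlock (H : Int) (block : List String) (grow_bottom : Bool) : List String :=
  if PySem.List.len block < H then
    if grow_bottom then padBlock H (block ++ [""]) false
    else padBlock H ([""] ++ block) true
  else block
termination_by (H - PySem.List.len block).toNat
decreasing_by
  all_goals simp only [PySem.List.len_eq, List.length_append, List.length_cons,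
    List.singleton_append] at *
  all_goals omega

def do_row_magic_py_alt (row_data : List String) : List (List String) :=
  let max_height : Int :=
    (PySem.List.max? (row_data.map (fun row => (PySem.Str.count row "\n" : Int))) (fun v => v)).getD 0 + 1
  row_data.map (fun row => padBlock max_height ((PySem.Str.split? row "\n").getD []) true)

-- ===== PRECONDITION & SPEC =====
-- Pre_ excludes only the empty list, on which Python A raises ValueError (max() of an empty sequence).
def Pre_do_row_magic_py (row_data : List String) : Prop := row_data ≠ []
instance (row_data : List String) : Decidable (Pre_do_row_magic_py row_data) := by
  unfold Pre_do_row_magic_py; infer_instance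
def pvWitness_do_row_magic_py : List String := ["a\nbb", "c"]

def Spec_do_row_magic_py (row_data : List String) (out : List (List String)) : Prop :=
  out = do_row_magic_py_alt row_data
instance (row_data : List String) (out : List (List String)) : Decidable (Spec_do_row_magic_py row_data out) := by
  unfold Spec_do_row_magic_py; infer_instance

-- ===== CLAIM =====
def Claim_equal_do_row_magic_py : Prop :=
  ∀ (row_data : List String), Dom_do_row_magic_py row_data → Pre_do_row_magic_py row_data →
    Spec_do_row_magic_py row_data (do_row_magic_py row_data)

-- ===== LEMMAS AND PROOFS =====

lemma fdiv2_eq (a : Int) : a.fdiv 2 = a / 2 := by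
  rw [Int.fdiv_eq_ediv]; simp

-- count.go only reads as much fuel as the string is long
lemma cgo_fuel (sep : List Char) (hs : sep ≠ []) : ∀ (f1 f2 : ℕ) (l : List Char) (acc : ℕ),
    l.length ≤ f1 → l.length ≤ f2 →
    PySem.Chars.count.go sep f1 l acc = PySem.Chars.count.go sep f2 l acc := by
  intro f1
  induction f1 with
  | zero => intro f2 l acc h1 h2
            have : l = [] := by simpa using List.length_eq_zero_iff.mp (Nat.le_zero.mp h1)
            subst this
            cases f2 <;> simp [PySem.Chars.count.go]
  | succ f ih =>
      intro f2 l acc h1 h2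
      cases l with
      | nil => cases f2 <;> simp [PySem.Chars.count.go]
      | cons c rest =>
          cases f2 with
          | zero => simp at h2
          | succ f2' =>
              have hsl : 1 ≤ sep.length := List.length_pos_of_ne_nil hs
              simp only [PySem.Chars.count.go]
              split
              · exact ih f2' _ _ (by simp at h1 ⊢; omega) (by simp at h2 ⊢; omega)
              · exact ih f2' _ _ (by simp at h1 ⊢; omega) (by simp at h2 ⊢; omega)

lemma cgo_offset (sep : List Char) : ∀ (f : ℕ) (l : List Char) (a : ℕ),
    PySem.Chars.count.go sep f l a = a + PySem.Chars.count.go sep f l 0 := by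
  intro f
  induction f with
  | zero => intro l a; cases l <;> simp [PySem.Chars.count.go]
  | succ f ih =>
      intro l a
      cases l with
      | nil => simp [PySem.Chars.count.go]
      | cons c rest =>
          simp only [PySem.Chars.count.go]
          split
          · rw [ih _ (a + 1), ih _ (0 + 1)]; omega
          · exact ih rest a

-- length of splitOn.go = 1 + number of separator occurrences + accumulator length
lemma sgo_len (sep : List Char) (hs : sep ≠ []) : ∀ (f : ℕ) (l cur : List Char) (acc : List (List Char)),
    l.length < f →
    (PySem.Chars.splitOn.go sep f l cur acc).length = acc.length + 1 + PySem.Chars.count.go sep f l 0 := by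
  intro f
  induction f with
  | zero => intro l cur acc h; omega
  | succ f ih =>
      intro l cur acc h
      cases l with
      | nil => simp [PySem.Chars.splitOn.go, PySem.Chars.count.go]
      | cons c rest =>
          simp only [PySem.Chars.splitOn.go, PySem.Chars.count.go]
          split
          · rename_i hp
            have hd : (List.drop sep.length (c :: rest)).length < f := by
              have : 1 ≤ sep.length := by cases sep <;> simp_all
              simp at h ⊢; omega
            rw [ih _ _ _ hd,
                cgo_fuel sep hs f f _ 1 (by omega) (by omega),
                cgo_offset sep f _ 1]
            simp; omega
          · have hr : rest.length < f := by simp at h; omega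
            rw [ih _ _ _ hr]

-- len(s.split("\n")) = s.count("\n") + 1
lemma length_split_count (s : String) :
    ((PySem.Str.split? s "\n").getD []).length = PySem.Str.count s "\n" + 1 := by
  have hsep : ("\n".toList : List Char) = ['\n'] := rfl
  show ((PySem.Str.split? s "\n").getD []).length = PySem.Chars.count s.toList "\n".toList + 1
  rw [PySem.Str.split?]
  have hsp : PySem.Chars.split? s.toList "\n".toList = some (PySem.Chars.splitOn s.toList ['\n']) := by
    rw [hsep]; simp [PySem.Chars.split?]
  rw [hsp]
  simp only [Option.map_some, Option.getD_some, List.length_map]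
  rw [PySem.Chars.splitOn]
  rw [sgo_len ['\n'] (by simp) _ _ _ _ (by omega)]
  rw [hsep, show PySem.Chars.count s.toList ['\n'] = PySem.Chars.count.go ['\n'] s.toList.length s.toList 0 from rfl]
  rw [cgo_fuel ['\n'] (by simp) (s.toList.length + 1) s.toList.length _ 0 (by omega) (by omega)]
  simp
  omega

lemma pyGetD_cons_succ {α : Type} (a : α) (xs : List α) (i : Int) (d : α) (h : 0 ≤ i) :
    PySem.List.pyGetD (a :: xs) (i + 1) d = PySem.List.pyGetD xs i d := by
  obtain ⟨n, rfl⟩ := Int.eq_ofNat_of_zero_le h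
  have : ((n : Int) + 1) = ((n + 1 : ℕ) : Int) := by push_cast; ring
  rw [this, PySem.List.pyGetD_natCast, PySem.List.pyGetD_natCast]
  simp [List.getD]

-- the index-fill loop writes x into positions s .. s+|x| of t
lemma fill_loop (x : List String) : ∀ (s : ℕ) (t : List String), s + x.length ≤ t.length →
    (PySem.List.pyRange (s : Int) ((s : Int) + (x.length : Int)) 1).foldl
      (fun tm j => PySem.List.pySetD tm j (PySem.List.pyGetD x (j - (s : Int)) "")) t
    = t.take s ++ x ++ t.drop (s + x.length) := by
  induction x with
  | nil =>
      intro s t _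
      have he : PySem.List.pyRange (s : Int) ((s : Int) + ((([] : List String).length : ℕ) : Int)) 1 = [] := by
        apply List.length_eq_zero_iff.mp
        rw [PySem.List.length_pyRange_one]; simp only [List.length_nil]; omega
      rw [he, List.foldl_nil]
      simp
  | cons a x' ih =>
      intro s t ht
      have ht' : s + (x'.length + 1) ≤ t.length := by simpa using ht
      have hs : s < t.length := by omega
      have hlc : (((a :: x').length : ℕ) : Int) = ((x'.length : ℕ) : Int) + 1 := by
        simp
      have hcons : PySem.List.pyRange (s : Int) ((s : Int) + ((a :: x').length : ℕ)) 1
          = (s : Int) :: PySem.List.pyRange ((s : Int) + 1) ((s : Int) + ((a :: x').length : ℕ)) 1 := by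
        apply PySem.List.pyRange_one_cons
        rw [hlc]; omega
      rw [hcons]
      simp only [List.foldl_cons]
      have hfirst : PySem.List.pySetD t (s : Int) (PySem.List.pyGetD (a :: x') ((s : Int) - (s : Int)) "") = t.set s a := by
        rw [sub_self]
        have : ((0 : Int)) = ((0 : ℕ) : Int) := rfl
        rw [this, PySem.List.pyGetD_natCast, PySem.List.pySetD_natCast]
        rfl
      rw [hfirst]
      have hcong : ∀ (tm : List String), ∀ j ∈ PySem.List.pyRange ((s : Int) + 1) ((s : Int) + ((a :: x').length : ℕ)) 1,
          (fun tm j => PySem.List.pySetD tm j (PySem.List.pyGetD (a :: x') (j - (s : Int)) "")) tm j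
          = (fun tm j => PySem.List.pySetD tm j (PySem.List.pyGetD x' (j - ((s + 1 : ℕ) : Int)) "")) tm j := by
        intro tm j hj
        have hj' := PySem.List.mem_pyRange_one.mp hj
        simp only
        have h1 : j - (s : Int) = (j - ((s + 1 : ℕ) : Int)) + 1 := by push_cast; ring
        rw [h1, pyGetD_cons_succ _ _ _ _ (by push_cast; omega)]
      rw [PySem.List.foldl_congr_mem _ _ _ _ hcong]
      have hb : (s : Int) + ((a :: x').length : ℕ) = ((s + 1 : ℕ) : Int) + ((x'.length : ℕ) : Int) := by
        rw [hlc]; push_cast; ring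
      have hb2 : (s : Int) + 1 = ((s + 1 : ℕ) : Int) := by push_cast; ring
      rw [hb, hb2]
      rw [ih (s + 1) (t.set s a) (by simp only [List.length_set]; omega)]
      have hset : t.set s a = t.take s ++ a :: t.drop (s + 1) := List.set_eq_take_cons_drop a hs
      have hlen : (t.take s).length = s := by simp; omega
      have hA : (t.set s a).take (s + 1) = t.take s ++ [a] := by
        rw [hset, List.take_append, hlen]
        have : List.take (s + 1) (List.take s t) = List.take s t := by
          rw [List.take_take]; congr 1; omega
        rw [this]
        congr 1
        have : s + 1 - s = 1 := by omega
        rw [this]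
        simp
      have hB : (t.set s a).drop (s + 1 + x'.length) = t.drop (s + (a :: x').length) := by
        rw [hset, List.drop_append, hlen]
        have h6 : List.drop (s + 1 + x'.length) (List.take s t) = [] := by
          apply List.drop_eq_nil_of_le; simp; omega
        rw [h6]
        have : s + 1 + x'.length - s = x'.length + 1 := by omega
        rw [this]
        simp only [List.nil_append, List.drop_succ_cons, List.drop_drop, List.length_cons]
        congr 1
        omega
      rw [hA, hB]
      simp

-- replacing row i of rows (read via enumerate) is a map when untouched rows are fixed points
lemma setfold (g : List String → List String) (c : List String → Bool) :
    ∀ (rows pre : List (List String)),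
    (PySem.List.enumerate rows (pre.length : Int)).foldl
        (fun acc p => if c p.2 then acc.set p.1.toNat (g p.2) else acc) (pre ++ rows)
    = pre ++ rows.map (fun y => if c y then g y else y) := by
  intro rows
  induction rows with
  | nil => intro pre; simp [PySem.List.enumerate]
  | cons y rows' ih =>
      intro pre
      rw [PySem.List.enumerate_cons]
      simp only [List.foldl_cons]
      have hset : (if c y then (pre ++ y :: rows').set ((pre.length : Int)).toNat (g y) else pre ++ y :: rows')
          = (pre ++ [if c y then g y else y]) ++ rows' := by
        by_cases hc : c y
        · simp only [hc, if_true, Int.toNat_natCast]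
          rw [List.set_append]
          simp
        · simp [hc]
      rw [hset]
      have hl : (pre.length : Int) + 1 = (((pre ++ [if c y then g y else y]).length : ℕ) : Int) := by
        simp
      rw [hl, ih (pre ++ [if c y then g y else y])]
      simp

-- one row: A's fill (or skip) equals the centered concatenation, given |x| ≤ H
lemma row_eq (H : Int) (x : List String) (hx : (x.length : Int) ≤ H) :
    (if PySem.List.len x < H then
        (PySem.List.pyRange (PySem.Int.floordiv (H - PySem.List.len x) 2)
            (PySem.Int.floordiv (H - PySem.List.len x) 2 + PySem.List.len x) 1).foldl
          (fun t j => PySem.List.pySetD t j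
            (PySem.List.pyGetD x (j - PySem.Int.floordiv (H - PySem.List.len x) 2) ""))
          (PySem.List.pyRepeat [""] H)
      else x)
    = PySem.List.pyRepeat [""] (PySem.Int.floordiv (H - PySem.List.len x) 2) ++ x ++
        PySem.List.pyRepeat [""] (H - PySem.List.len x - PySem.Int.floordiv (H - PySem.List.len x) 2) := by
  have hlen : PySem.List.len x = (x.length : Int) := PySem.List.len_eq x
  rw [hlen] at *
  by_cases hlt : (x.length : Int) < H
  · rw [if_pos hlt]
    set st : Int := PySem.Int.floordiv (H - (x.length : Int)) 2 with hst
    have hstv : st = (H - (x.length : Int)) / 2 := by rw [hst, PySem.Int.floordiv, fdiv2_eq]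
    have hst0 : 0 ≤ st := by omega
    have hstle : st + (x.length : Int) ≤ H := by omega
    have hsn : st = ((st.toNat : ℕ) : Int) := by omega
    rw [PySem.List.pyRepeat_singleton, PySem.List.pyRepeat_singleton, PySem.List.pyRepeat_singleton]
    rw [hsn]
    rw [fill_loop x st.toNat (List.replicate H.toNat "") (by simp only [List.length_replicate]; omega)]
    rw [List.take_replicate, List.drop_replicate]
    have e1 : min st.toNat H.toNat = st.toNat := by omega
    have e2 : H.toNat - (st.toNat + x.length) = (H - (x.length : Int) - st).toNat := by omega
    rw [e1, e2, ← hsn]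
  · rw [if_neg hlt]
    have hxe : (x.length : Int) = H := by omega
    have h0 : PySem.Int.floordiv (H - (x.length : Int)) 2 = 0 := by
      rw [PySem.Int.floordiv, fdiv2_eq]; omega
    rw [h0]
    simp [PySem.List.pyRepeat_singleton, hxe]

-- setfold at start 0 with empty prefix
lemma setfold0 (g : List String → List String) (c : List String → Bool) (rows : List (List String)) :
    (PySem.List.enumerate rows 0).foldl
        (fun acc p => if c p.2 then acc.set p.1.toNat (g p.2) else acc) rows
    = rows.map (fun y => if c y then g y else y) := by
  have h := setfold g c rows []
  simpa using h

-- the whole A pipeline, for any height bound H dominating every row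
lemma main_aux (H : Int) (row_data : List String)
    (hbound : ∀ row ∈ row_data, ((((PySem.Str.split? row "\n").getD []).length : ℕ) : Int) ≤ H) :
    (PySem.List.enumerate (row_data.map (fun row => (PySem.Str.split? row "\n").getD [])) 0).foldl
      (fun acc p =>
        if PySem.List.len p.2 < H then
          acc.set p.1.toNat
            ((PySem.List.pyRange (PySem.Int.floordiv (H - PySem.List.len p.2) 2)
                (PySem.Int.floordiv (H - PySem.List.len p.2) 2 + PySem.List.len p.2) 1).foldl
              (fun t j => PySem.List.pySetD t j
                (PySem.List.pyGetD p.2 (j - PySem.Int.floordiv (H - PySem.List.len p.2) 2) ""))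
              (PySem.List.pyRepeat [""] H))
        else acc)
      (row_data.map (fun row => (PySem.Str.split? row "\n").getD []))
    = row_data.map (fun row =>
        PySem.List.pyRepeat [""] (PySem.Int.floordiv (H - PySem.List.len ((PySem.Str.split? row "\n").getD [])) 2) ++
          (PySem.Str.split? row "\n").getD [] ++
          PySem.List.pyRepeat [""] (H - PySem.List.len ((PySem.Str.split? row "\n").getD []) -
            PySem.Int.floordiv (H - PySem.List.len ((PySem.Str.split? row "\n").getD [])) 2)) := by
  have h := setfold0
    (fun x => (PySem.List.pyRange (PySem.Int.floordiv (H - PySem.List.len x) 2)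
        (PySem.Int.floordiv (H - PySem.List.len x) 2 + PySem.List.len x) 1).foldl
      (fun t j => PySem.List.pySetD t j
        (PySem.List.pyGetD x (j - PySem.Int.floordiv (H - PySem.List.len x) 2) ""))
      (PySem.List.pyRepeat [""] H))
    (fun x => decide (PySem.List.len x < H))
    (row_data.map (fun row => (PySem.Str.split? row "\n").getD []))
  simp only [decide_eq_true_eq] at h
  rw [h, List.map_map]
  apply List.map_congr_left
  intro row hrow
  simp only [Function.comp]
  exact row_eq H ((PySem.Str.split? row "\n").getD []) (hbound row hrow)

-- B's growth loop, characterised: padding by k blanks puts ⌊k/2⌋ on the side grown second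
lemma padBlock_eq : ∀ (k : ℕ) (block : List String) (b : Bool),
    padBlock ((block.length + k : ℕ) : Int) block b
      = List.replicate (if b then k / 2 else k - k / 2) "" ++ block ++
        List.replicate (if b then k - k / 2 else k / 2) "" := by
  intro k
  induction k with
  | zero =>
      intro block b
      rw [padBlock]
      rw [if_neg (by rw [PySem.List.len_eq]; omega)]
      simp
  | succ k ih =>
      intro block b
      rw [padBlock]
      rw [if_pos (by rw [PySem.List.len_eq]; push_cast; omega)]
      cases b with
      | true =>
          simp only [if_true]
          have harg : ((block.length + (k + 1) : ℕ) : Int) = (((block ++ [""]).length + k : ℕ) : Int) := by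
            simp; omega
          rw [harg, ih (block ++ [""]) false]
          simp only [Bool.false_eq_true, if_false]
          have h2 : (block ++ [""]) ++ List.replicate (k / 2) "" = block ++ List.replicate ((k + 1) - (k + 1) / 2) "" := by
            rw [show (k + 1) - (k + 1) / 2 = k / 2 + 1 from by omega, List.replicate_succ,
              List.append_assoc, List.singleton_append]
          rw [List.append_assoc, h2, show k - k / 2 = (k + 1) / 2 from by omega, ← List.append_assoc]
      | false =>
          simp only [Bool.false_eq_true, if_false]
          have harg : ((block.length + (k + 1) : ℕ) : Int) = ((([""] ++ block).length + k : ℕ) : Int) := by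
            simp; omega
          rw [harg, ih ([""] ++ block) true]
          simp only [if_true]
          have h1 : List.replicate (k / 2) "" ++ ([""] ++ block) = List.replicate ((k + 1) - (k + 1) / 2) "" ++ block := by
            rw [show (k + 1) - (k + 1) / 2 = k / 2 + 1 from by omega, List.replicate_succ',
              ← List.append_assoc]
          rw [h1, show k - k / 2 = (k + 1) / 2 from by omega]

-- B's loop equals the centered concatenation form of A, given |x| ≤ H
lemma padBlock_concat (H : Int) (x : List String) (hx : (x.length : Int) ≤ H) :
    padBlock H x true
      = PySem.List.pyRepeat [""] (PySem.Int.floordiv (H - PySem.List.len x) 2) ++ x ++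
        PySem.List.pyRepeat [""] (H - PySem.List.len x - PySem.Int.floordiv (H - PySem.List.len x) 2) := by
  have hlen : PySem.List.len x = (x.length : Int) := PySem.List.len_eq x
  set k : ℕ := (H - (x.length : Int)).toNat with hk
  have hH : H = ((x.length + k : ℕ) : Int) := by push_cast; omega
  rw [hlen, PySem.List.pyRepeat_singleton, PySem.List.pyRepeat_singleton]
  have hd : PySem.Int.floordiv (H - (x.length : Int)) 2 = (H - (x.length : Int)) / 2 := by
    rw [PySem.Int.floordiv, fdiv2_eq]
  rw [hd]
  have e1 : ((H - (x.length : Int)) / 2).toNat = k / 2 := by omega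
  have e2 : (H - (x.length : Int) - (H - (x.length : Int)) / 2).toNat = k - k / 2 := by omega
  rw [e1, e2, hH, padBlock_eq k x true]
  simp

-- ===== VERDICT =====
theorem do_row_magic_py_spec : Claim_equal_do_row_magic_py := by
  intro row_data _ hpre
  unfold Spec_do_row_magic_py do_row_magic_py do_row_magic_py_alt
  cases hmx : PySem.List.max? (row_data.map (fun i => (PySem.Str.count i "\n" : Int))) (fun v => v) with
  | none =>
      exfalso
      have := (PySem.List.max?_eq_none_iff _ (fun v : Int => v)).mp hmx
      cases row_data with
      | nil => exact hpre rfl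
      | cons a l => simp at this
  | some m =>
      simp only [Option.getD_some]
      have hbound : ∀ row ∈ row_data, ((((PySem.Str.split? row "\n").getD []).length : ℕ) : Int) ≤ m + 1 := by
        intro row hrow
        have h1 : ((PySem.Str.split? row "\n").getD []).length = PySem.Str.count row "\n" + 1 :=
          length_split_count row
        have h2 : ((PySem.Str.count row "\n" : ℕ) : Int) ≤ m :=
          PySem.List.max?_isMax hmx _ (List.mem_map_of_mem hrow)
        rw [h1]; push_cast at h2 ⊢; omega
      rw [main_aux (m + 1) row_data hbound]
      apply List.map_congr_left
      intro row hrow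
      exact (padBlock_concat (m + 1) ((PySem.Str.split? row "\n").getD []) (hbound row hrow)).symm
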